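-- pv_equiv track=rewrite | github.com/Phong1ee/CNET_ASSIGMENT | DownloadManager.py | _get_rarest_pieces
-- ===== SOURCE A (Python) =====
-- def _get_rarest_pieces(bitfields):
--     """Returns a list of pieces ordered by rarity."""
--     piece_count = {}
--
--     for bitfield in bitfields.values():
--         for idx, bit in enumerate(bitfield):
--             if bit == 1:
--                 piece_count[idx] = piece_count.get(idx, 0) + 1
--
--     # Sort pieces by rarity (ascending)
--     return [
--         piece for piece, _ in sorted(piece_count.items(), key=lambda item: item[1])
--     ]
-- ===== SOURCE B (Python) =====
-- def _get_rarest_pieces(bitfields):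
--     """Returns a list of pieces ordered by rarity (counting/bucket collection)."""
--     ones = [idx for bitfield in bitfields.values()
--             for idx, bit in enumerate(bitfield) if bit == 1]
--     counts = {}
--     for i in ones:
--         counts[i] = counts.get(i, 0) + 1
--     if not counts:
--         return []
--     result = []
--     for b in range(max(counts.values()) + 1):
--         result += [piece for piece, c in counts.items() if c == b]
--     return result
-- ===== Notes on version B (the rewrite author's own statement) =====
-- stated objective: alternative
-- what changed: B flattens the bitfields into one list of 1-bit indices, counts them in a single flat pass, and collects pieces into rarity buckets scanned from count 0 up to the maximum count, instead of comparison-sorting the dict items by count.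
import Mathlib
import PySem

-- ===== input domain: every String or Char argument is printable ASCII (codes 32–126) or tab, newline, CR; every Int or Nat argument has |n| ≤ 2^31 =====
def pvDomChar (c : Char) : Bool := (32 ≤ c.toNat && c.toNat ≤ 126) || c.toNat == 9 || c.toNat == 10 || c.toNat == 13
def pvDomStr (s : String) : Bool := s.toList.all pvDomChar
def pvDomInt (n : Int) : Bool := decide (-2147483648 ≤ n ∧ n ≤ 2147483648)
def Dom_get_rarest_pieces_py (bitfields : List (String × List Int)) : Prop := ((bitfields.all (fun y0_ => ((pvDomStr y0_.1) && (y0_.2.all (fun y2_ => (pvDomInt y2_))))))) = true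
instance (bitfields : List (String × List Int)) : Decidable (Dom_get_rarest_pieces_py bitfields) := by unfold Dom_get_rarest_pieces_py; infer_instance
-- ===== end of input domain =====

-- B replaces A's comparison sort of the piece counts by a flatten-count-and-bucket pass (alternative decomposition, similar cost); return value only, no mutation.


-- ===== PORT A =====
def get_rarest_pieces_py (bitfields : List (String × List Int)) : List Int :=
  let piece_count : PySem.Dict Int Int :=
    ((PySem.Dict.ofList bitfields).values).foldl
      (fun d bitfield =>
        (PySem.List.enumerate bitfield 0).foldl
          (fun d p => if p.2 == 1 then d.insert p.1 (d.getD p.1 0 + 1) else d) d)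
      PySem.Dict.empty
  (PySem.List.sorted piece_count.items (fun item => item.2) false).map (fun item => item.1)

-- ===== PORT B =====
def get_rarest_pieces_py_alt (bitfields : List (String × List Int)) : List Int :=
  let ones : List Int :=
    ((PySem.Dict.ofList bitfields).values).flatMap
      (fun bitfield => ((PySem.List.enumerate bitfield 0).filter (fun p => p.2 == 1)).map (fun p => p.1))
  let counts : PySem.Dict Int Int :=
    ones.foldl (fun d i => d.modify i 0 (fun c => c + 1)) PySem.Dict.empty
  if counts.items.length = 0 then []
  else
    match PySem.List.max? counts.values (fun v => v) with
    | none => []  -- unreachable: counts is nonempty in this branch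
    | some m =>
      (PySem.List.pyRange 0 (m + 1) 1).foldl
        (fun result b => result ++ (counts.items.filter (fun pc => pc.2 == b)).map (fun pc => pc.1)) []

-- ===== PRECONDITION & SPEC =====
def Spec_get_rarest_pieces_py (bitfields : List (String × List Int)) (out : List Int) : Prop := out = get_rarest_pieces_py_alt bitfields
instance (bitfields : List (String × List Int)) (out : List Int) : Decidable (Spec_get_rarest_pieces_py bitfields out) := by unfold Spec_get_rarest_pieces_py; infer_instance

-- ===== CLAIM (what is proved, stated in full; the proofs are below) =====
def Claim_equal_get_rarest_pieces_py : Prop := ∀ (bitfields : List (String × List Int)), Dom_get_rarest_pieces_py bitfields → Spec_get_rarest_pieces_py bitfields (get_rarest_pieces_py bitfields)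

-- ===== LEMMAS AND PROOFS =====

-- A's inner 'if bit == 1' dict-update loop counts exactly the filtered-and-mapped 1-indices.
theorem innerLoop_eq (l : List (Int × Int)) (d : PySem.Dict Int Int) :
    l.foldl (fun d p => if p.2 == 1 then d.insert p.1 (d.getD p.1 0 + 1) else d) d
      = ((l.filter (fun p => p.2 == 1)).map (fun p => p.1)).foldl
          (fun d i => d.modify i 0 (fun c => c + 1)) d := by
  induction l generalizing d with
  | nil => rfl
  | cons p t ih =>
    rw [List.foldl_cons, List.filter_cons]
    by_cases h : p.2 == 1
    · rw [if_pos h, if_pos h, List.map_cons, List.foldl_cons, ih]; rfl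
    · rw [if_neg h, if_neg h, ih]

-- A's nested counting loops equal B's single counting pass over the flattened 1-index list.
theorem countA_eq (vals : List (List Int)) (d : PySem.Dict Int Int) :
    vals.foldl
      (fun d bitfield =>
        (PySem.List.enumerate bitfield 0).foldl
          (fun d p => if p.2 == 1 then d.insert p.1 (d.getD p.1 0 + 1) else d) d) d
      = (vals.flatMap (fun bitfield =>
            ((PySem.List.enumerate bitfield 0).filter (fun p => p.2 == 1)).map (fun p => p.1))).foldl
          (fun d i => d.modify i 0 (fun c => c + 1)) d := by
  induction vals generalizing d with
  | nil => rfl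
  | cons bf t ih =>
    rw [List.foldl_cons, List.flatMap_cons, List.foldl_append, innerLoop_eq, ih]

theorem insertBy_append_not {α : Type} (before : α → α → Bool) (x : α) (as bs : List α)
    (h : ∀ a ∈ as, before x a = false) :
    PySem.List.insertBy before x (as ++ bs) = as ++ PySem.List.insertBy before x bs := by
  induction as with
  | nil => rfl
  | cons a t ih =>
    have ha : before x a = false := h a (by simp)
    simp only [List.cons_append, PySem.List.insertBy, ha]
    simp only [Bool.false_eq_true, if_false]
    exact congrArg (a :: ·) (ih (fun a ha' => h a (by simp [ha'])))

theorem insertBy_all_before {α : Type} (before : α → α → Bool) (x : α) (bs : List α)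
    (h : ∀ y ∈ bs, before x y = true) :
    PySem.List.insertBy before x bs = x :: bs := by
  cases bs with
  | nil => rfl
  | cons b t => simp [PySem.List.insertBy, h b (by simp)]

-- Stable insertion of an element whose key lies in cs appends it to its own bucket.
theorem insertBy_flatMap (cs : List Int) (F : Int → List (Int × Int)) (x : Int × Int)
    (hcs : cs.Pairwise (· < ·)) (hx : x.2 ∈ cs)
    (hF : ∀ c ∈ cs, ∀ p ∈ F c, p.2 = c) :
    PySem.List.insertBy (fun a b => decide (a.2 < b.2)) x (cs.flatMap F)
      = cs.flatMap (fun c => F c ++ if x.2 = c then [x] else []) := by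
  induction cs with
  | nil => cases hx
  | cons c cs' ih =>
    have hlt : ∀ c' ∈ cs', c < c' := (List.pairwise_cons.mp hcs).1
    rw [List.flatMap_cons, List.flatMap_cons]
    by_cases hxc : x.2 = c
    · have h1 : ∀ a ∈ F c, (decide (x.2 < a.2)) = false := by
        intro a ha
        have := hF c (by simp) a ha
        simp [this, hxc]
      have h2 : ∀ y ∈ cs'.flatMap F, (decide (x.2 < y.2)) = true := by
        intro y hy
        obtain ⟨c', hc', hyF⟩ := List.mem_flatMap.mp hy
        have := hF c' (by simp [hc']) y hyF
        simp [this, hxc]; exact hlt c' hc'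
      rw [insertBy_append_not _ _ _ _ h1, insertBy_all_before _ _ _ h2]
      have h3 : cs'.flatMap (fun c' => F c' ++ if x.2 = c' then [x] else []) = cs'.flatMap F := by
        apply List.flatMap_congr
        intro c' hc'
        have : x.2 ≠ c' := by have := hlt c' hc'; omega
        simp [this]
      rw [h3, if_pos hxc]
      simp
    · have hx' : x.2 ∈ cs' := by cases List.mem_cons.mp hx with
        | inl h => exact absurd h hxc
        | inr h => exact h
      have hcx : c < x.2 := hlt _ hx'
      have h1 : ∀ a ∈ F c, (decide (x.2 < a.2)) = false := by
        intro a ha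
        have := hF c (by simp) a ha
        simp [this]; omega
      rw [insertBy_append_not _ _ _ _ h1, if_neg hxc,
        ih (List.pairwise_cons.mp hcs).2 hx' (fun c' hc' => hF c' (by simp [hc']))]
      simp

-- Stable sort by key = concatenation of the key-buckets over any strictly increasing key cover.
theorem sorted_buckets (xs : List (Int × Int)) (cs : List Int)
    (hcs : cs.Pairwise (· < ·)) (hmem : ∀ p ∈ xs, p.2 ∈ cs) :
    PySem.List.sorted xs (fun p => p.2) false
      = cs.flatMap (fun c => xs.filter (fun p => p.2 == c)) := by
  induction xs using List.reverseRecOn with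
  | nil => simp [PySem.List.sorted]
  | append_singleton t x ih =>
    rw [PySem.List.sorted_eq_foldl_insertBy, List.foldl_append, List.foldl_cons, List.foldl_nil,
      ← PySem.List.sorted_eq_foldl_insertBy,
      ih (fun p hp => hmem p (by simp [hp])),
      insertBy_flatMap cs _ x hcs (hmem x (by simp))
        (fun c hc p hp => by simpa using (List.of_mem_filter hp))]
    apply List.flatMap_congr
    intro c hc
    simp [List.filter_append, List.filter_cons, beq_iff_eq]

theorem main_eq (bitfields : List (String × List Int)) :
    get_rarest_pieces_py bitfields = get_rarest_pieces_py_alt bitfields := by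
  unfold get_rarest_pieces_py get_rarest_pieces_py_alt
  rw [countA_eq]
  simp only [← PySem.Dict.counter_eq_foldl]
  set ones : List Int :=
    ((PySem.Dict.ofList bitfields).values).flatMap
      (fun bitfield => ((PySem.List.enumerate bitfield 0).filter (fun p => p.2 == 1)).map (fun p => p.1)) with hones
  by_cases hemp : (PySem.Dict.counter ones).items.length = 0
  · rw [if_pos hemp]
    have : (PySem.Dict.counter ones).items = [] := List.length_eq_zero_iff.mp hemp
    rw [this]
    simp [PySem.List.sorted]
  · rw [if_neg hemp]
    have hne : (PySem.Dict.counter ones).items ≠ [] := fun h => hemp (by rw [h]; rfl)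
    cases hmax : PySem.List.max? (PySem.Dict.counter ones).values (fun v => v) with
    | none =>
      exact absurd ((PySem.List.max?_eq_none_iff _ _).mp hmax)
        (by simpa [PySem.Dict.values] using hne)
    | some m =>
      have hisMax := PySem.List.max?_isMax hmax
      have hmem : ∀ p ∈ (PySem.Dict.counter ones).items, p.2 ∈ PySem.List.pyRange 0 (m + 1) 1 := by
        intro p hp
        rw [PySem.List.mem_pyRange_one]
        constructor
        · rw [PySem.Dict.items_counter] at hp
          obtain ⟨k, hk, rfl⟩ := List.mem_map.mp hp
          simp
        · have : p.2 ∈ (PySem.Dict.counter ones).values := by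
            simp only [PySem.Dict.values]
            exact List.mem_map.mpr ⟨p, hp, rfl⟩
          have := hisMax _ this
          omega
      rw [sorted_buckets _ _ (PySem.List.pairwise_lt_pyRange_one 0 (m+1)) hmem]
      simp only [PySem.List.foldl_append_eq_flatMap, List.map_flatMap, List.nil_append]

-- ===== VERDICT (by name: the statement is the Claim_ definition above) =====
theorem get_rarest_pieces_py_spec : Claim_equal_get_rarest_pieces_py := by
  intro bitfields _
  exact main_eq bitfields
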